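-- pv_equiv track=rewrite | github.com/weselyj/Clarity-OMR-Train-RADIO | src/data/convert_tokens.py | _split_staff_sequences_for_validation
-- ===== SOURCE A (Python) =====
-- from typing import Dict, Iterable, List, Optional, Sequence, Tuple
--
-- def _split_staff_sequences_for_validation(token_sequence: Sequence[str]) -> List[List[str]]:
--     if not token_sequence:
--         return []
--     if token_sequence.count("<staff_start>") <= 1:
--         return [list(token_sequence)]
--
--     staff_sequences: List[List[str]] = []
--     idx = 0
--     while idx < len(token_sequence):
--         if token_sequence[idx] != "<staff_start>":
--             idx += 1
--             continue
--         end_idx = idx + 1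
--         while end_idx < len(token_sequence) and token_sequence[end_idx] != "<staff_end>":
--             end_idx += 1
--         if end_idx >= len(token_sequence):
--             raise ValueError("Malformed token sequence: missing <staff_end>.")
--         staff_sequences.append(["<bos>", *token_sequence[idx : end_idx + 1], "<eos>"])
--         idx = end_idx + 1
--     return staff_sequences
-- ===== SOURCE B (Python) =====
-- def _split_staff_sequences_for_validation(token_sequence):
--     if not token_sequence:
--         return []
--     if token_sequence.count("<staff_start>") <= 1:
--         return [list(token_sequence)]
--
--     staff_sequences = []
--     inside = False
--     segment = []
--     for token in token_sequence:
--         if inside: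
--             segment.append(token)
--             if token == "<staff_end>":
--                 staff_sequences.append(["<bos>", *segment, "<eos>"])
--                 segment = []
--                 inside = False
--         elif token == "<staff_start>":
--             inside = True
--             segment = [token]
--     if inside:
--         raise ValueError("Malformed token sequence: missing <staff_end>.")
--     return staff_sequences
-- ===== Notes on version B (the rewrite author's own statement) =====
-- stated objective: simpler
-- what changed: Replaced the index-based outer while loop with a nested inner scan-for-<staff_end> loop by a single flat for-pass over the tokens that maintains an 'inside' flag and the current segment.
import Mathlib
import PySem

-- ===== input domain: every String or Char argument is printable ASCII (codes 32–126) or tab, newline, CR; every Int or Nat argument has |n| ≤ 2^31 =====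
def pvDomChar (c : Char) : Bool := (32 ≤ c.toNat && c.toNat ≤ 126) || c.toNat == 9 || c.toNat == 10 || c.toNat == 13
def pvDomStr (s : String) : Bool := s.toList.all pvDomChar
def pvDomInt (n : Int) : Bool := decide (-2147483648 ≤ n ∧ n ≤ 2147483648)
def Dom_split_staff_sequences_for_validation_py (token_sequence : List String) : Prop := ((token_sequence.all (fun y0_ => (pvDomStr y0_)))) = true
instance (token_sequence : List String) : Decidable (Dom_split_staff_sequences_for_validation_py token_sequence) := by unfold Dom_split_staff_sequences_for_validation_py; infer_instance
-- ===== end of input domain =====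

-- B replaces A's index-based outer while loop with nested inner scan by a single flat
-- pass keeping an 'inside' flag and the current segment (objective: simpler).

-- ===== PORT A =====
-- inner while loop: advance end_idx until "<staff_end>" or end of list
-- (fuel = remaining length, so the recursion is structural and kernel-evaluable;
--  fuel is always exactly ts.length - k, so the guard k < ts.length drives the loop as in Python)
def aInnerGo (ts : List String) (fuel k : Nat) : Nat :=
  match fuel with
  | 0 => k
  | fuel + 1 =>
    if k < ts.length then
      if ts[k]! ≠ "<staff_end>" then aInnerGo ts fuel (k + 1) else k
    else k

def aInner (ts : List String) (k : Nat) : Nat := aInnerGo ts (ts.length - k) k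

-- outer while loop over idx (fuel ≥ ts.length - idx; idx advances by at least 1 each step);
-- the slice token_sequence[idx:end_idx+1] is (ts.drop idx).take (e+1-idx), exact here
-- since 0 ≤ idx ≤ e+1 (PySem.List.slice_natCast)
def aOuterGo (ts : List String) (fuel idx : Nat) (acc : List (List String)) : List (List String) :=
  match fuel with
  | 0 => acc
  | fuel + 1 =>
    if idx < ts.length then
      if ts[idx]! ≠ "<staff_start>" then aOuterGo ts fuel (idx + 1) acc
      else
        let e := aInner ts (idx + 1)
        if e < ts.length then
          aOuterGo ts fuel (e + 1) (acc ++ [["<bos>"] ++ (ts.drop idx).take (e + 1 - idx) ++ ["<eos>"]])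
        else acc  -- Python raises ValueError here; excluded by Pre_
    else acc

def split_staff_sequences_for_validation_py (token_sequence : List String) : List (List String) :=
  if token_sequence = [] then []
  else if token_sequence.count "<staff_start>" ≤ 1 then [token_sequence]
  else aOuterGo token_sequence token_sequence.length 0 []

-- ===== PORT B =====
-- the flat for-loop of Source B: state = (inside, segment, staff_sequences)
def bLoop (ts : List String) (inside : Bool) (segment : List String)
    (acc : List (List String)) : List (List String) :=
  match ts with
  | [] => acc  -- Python raises ValueError here if inside = true; excluded by Pre_
  | t :: rest =>
    if inside then
      let seg := segment ++ [t]
      if t = "<staff_end>" then bLoop rest false [] (acc ++ [["<bos>"] ++ seg ++ ["<eos>"]])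
      else bLoop rest true seg acc
    else if t = "<staff_start>" then bLoop rest true [t] acc
    else bLoop rest false segment acc

def split_staff_sequences_for_validation_py_alt (token_sequence : List String) : List (List String) :=
  if token_sequence = [] then []
  else if token_sequence.count "<staff_start>" ≤ 1 then [token_sequence]
  else bLoop token_sequence false [] []

-- ===== PRECONDITION & SPEC =====
-- every suffix beginning with "<staff_start>" contains "<staff_end>" later on
def goodTails (ts : List String) : Bool :=
  ts.tails.all fun t =>
    match t with
    | [] => true
    | s :: rest => (s != "<staff_start>") || rest.contains "<staff_end>"

-- Pre_ excludes exactly the inputs on which A raises ValueError (more than one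
-- "<staff_start>" and some "<staff_start>" with no later "<staff_end>"); B raises there too.
def Pre_split_staff_sequences_for_validation_py (token_sequence : List String) : Prop :=
  token_sequence.count "<staff_start>" ≤ 1 ∨ goodTails token_sequence = true
instance (token_sequence : List String) : Decidable (Pre_split_staff_sequences_for_validation_py token_sequence) := by unfold Pre_split_staff_sequences_for_validation_py; infer_instance

def pvWitness_split_staff_sequences_for_validation_py : List String :=
  ["<staff_start>", "a", "<staff_end>", "<staff_start>", "<staff_end>"]

def Spec_split_staff_sequences_for_validation_py (token_sequence : List String) (out : List (List String)) : Prop := out = split_staff_sequences_for_validation_py_alt token_sequence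
instance (token_sequence : List String) (out : List (List String)) : Decidable (Spec_split_staff_sequences_for_validation_py token_sequence out) := by unfold Spec_split_staff_sequences_for_validation_py; infer_instance

-- ===== CLAIM (what is proved, stated in full; the proofs are below) =====
def Claim_equal_split_staff_sequences_for_validation_py : Prop := ∀ (token_sequence : List String), Dom_split_staff_sequences_for_validation_py token_sequence → Pre_split_staff_sequences_for_validation_py token_sequence → Spec_split_staff_sequences_for_validation_py token_sequence (split_staff_sequences_for_validation_py token_sequence)

-- ===== LEMMAS AND PROOFS =====

theorem getElemBang_pos (ts : List String) (i : Nat) (h : i < ts.length) :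
    ts[i]! = ts[i] := getElem!_pos ts i h

theorem drop_cons_of_lt (ts : List String) (i : Nat) (h : i < ts.length) :
    ts.drop i = ts[i]! :: ts.drop (i + 1) := by
  rw [getElemBang_pos ts i h]
  exact List.drop_eq_getElem_cons h

-- step equations for bLoop
theorem bLoop_nil (inside : Bool) (seg : List String) (acc : List (List String)) :
    bLoop [] inside seg acc = acc := rfl

theorem bLoop_out_start (rest seg : List String) (acc : List (List String)) :
    bLoop ("<staff_start>" :: rest) false seg acc = bLoop rest true ["<staff_start>"] acc := by
  simp [bLoop]

theorem bLoop_out_other (t : String) (rest seg : List String) (acc : List (List String))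
    (h : t ≠ "<staff_start>") :
    bLoop (t :: rest) false seg acc = bLoop rest false seg acc := by
  simp [bLoop, h]

theorem bLoop_in_end (rest seg : List String) (acc : List (List String)) :
    bLoop ("<staff_end>" :: rest) true seg acc =
      bLoop rest false [] (acc ++ [["<bos>"] ++ (seg ++ ["<staff_end>"]) ++ ["<eos>"]]) := by
  simp [bLoop]

theorem bLoop_in_other (t : String) (rest seg : List String) (acc : List (List String))
    (h : t ≠ "<staff_end>") :
    bLoop (t :: rest) true seg acc = bLoop rest true (seg ++ [t]) acc := by
  simp [bLoop, h]

-- step equations for aInner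
theorem le_aInnerGo (ts : List String) : ∀ fuel k, k ≤ aInnerGo ts fuel k := by
  intro fuel
  induction fuel with
  | zero => intro k; simp [aInnerGo]
  | succ fuel ih =>
    intro k
    simp only [aInnerGo]
    split_ifs with h1 h2
    · have := ih (k + 1); omega
    · omega
    · omega

theorem le_aInner (ts : List String) (k : Nat) : k ≤ aInner ts k := le_aInnerGo ts _ k

theorem aInner_end (ts : List String) (k : Nat) (h : k < ts.length)
    (he : ts[k]! = "<staff_end>") : aInner ts k = k := by
  unfold aInner
  have hf : ts.length - k = (ts.length - (k + 1)) + 1 := by omega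
  rw [hf]
  have he' : ts[k] = "<staff_end>" := by rw [← getElemBang_pos ts k h]; exact he
  simp [aInnerGo, h, he']

theorem aInner_step (ts : List String) (k : Nat) (h : k < ts.length)
    (he : ts[k]! ≠ "<staff_end>") : aInner ts k = aInner ts (k + 1) := by
  unfold aInner
  have hf : ts.length - k = (ts.length - (k + 1)) + 1 := by omega
  rw [hf]
  have he' : ¬ ts[k] = "<staff_end>" := by rw [← getElemBang_pos ts k h]; exact he
  simp [aInnerGo, h, he']

theorem goodTails_start_end (ts : List String) (hg : goodTails ts = true) :
    ∀ i, i < ts.length → ts[i]! = "<staff_start>" →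
      ∃ j, i < j ∧ j < ts.length ∧ ts[j]! = "<staff_end>" := by
  intro i hi hs
  have hmem : ts.drop i ∈ ts.tails := by
    rw [List.mem_tails]; exact List.drop_suffix i ts
  have hall := List.all_eq_true.mp hg _ hmem
  rw [drop_cons_of_lt ts i hi, hs] at hall
  simp only [bne_self_eq_false, Bool.false_or] at hall
  have hmem' : "<staff_end>" ∈ ts.drop (i + 1) := by simpa using hall
  obtain ⟨m, hm, he⟩ := List.getElem_of_mem hmem'
  have hlen : i + 1 + m < ts.length := by
    have := List.length_drop (l := ts) (i := i + 1); omega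
  refine ⟨i + 1 + m, by omega, hlen, ?_⟩
  rw [getElemBang_pos ts _ hlen]
  rw [List.getElem_drop] at he
  exact he

theorem inner_eq (ts : List String) :
    ∀ k segment acc,
      (∃ j, k ≤ j ∧ j < ts.length ∧ ts[j]! = "<staff_end>") →
      aInner ts k < ts.length ∧
      bLoop (ts.drop k) true segment acc =
        bLoop (ts.drop (aInner ts k + 1)) false []
          (acc ++ [["<bos>"] ++ (segment ++ (ts.drop k).take (aInner ts k + 1 - k)) ++ ["<eos>"]]) := by
  intro k
  induction hd : ts.length - k using Nat.strong_induction_on generalizing k with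
  | _ d ih =>
    intro segment acc hend
    obtain ⟨j, hkj, hjl, hje⟩ := hend
    have hk : k < ts.length := by omega
    by_cases he : ts[k]! = "<staff_end>"
    · rw [aInner_end ts k hk he]
      refine ⟨hk, ?_⟩
      rw [drop_cons_of_lt ts k hk, he, bLoop_in_end]
      have h1 : k + 1 - k = 1 := by omega
      rw [h1]
      simp
    · have hend' : ∃ j, k + 1 ≤ j ∧ j < ts.length ∧ ts[j]! = "<staff_end>" := by
        refine ⟨j, ?_, hjl, hje⟩
        rcases Nat.lt_or_ge k j with hlt | hge
        · omega
        · exfalso; have : j = k := by omega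
          exact he (this ▸ hje)
      obtain ⟨h1, h2⟩ := ih (ts.length - (k + 1)) (by omega) (k + 1) rfl
        (segment ++ [ts[k]!]) acc hend'
      rw [aInner_step ts k hk he]
      refine ⟨h1, ?_⟩
      rw [drop_cons_of_lt ts k hk, bLoop_in_other _ _ _ _ he, h2]
      have hge := le_aInner ts (k + 1)
      have hstep : aInner ts (k + 1) + 1 - k = (aInner ts (k + 1) + 1 - (k + 1)) + 1 := by omega
      rw [hstep, List.take_succ_cons]
      simp

theorem outer_eq (ts : List String) (hg : goodTails ts = true) :
    ∀ fuel idx acc, ts.length - idx ≤ fuel →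
      bLoop (ts.drop idx) false [] acc = aOuterGo ts fuel idx acc := by
  intro fuel
  induction fuel with
  | zero =>
    intro idx acc hfuel
    rw [List.drop_eq_nil_of_le (by omega)]
    rfl
  | succ fuel ih =>
    intro idx acc hfuel
    by_cases h : idx < ts.length
    · by_cases hs : ts[idx]! = "<staff_start>"
      · obtain ⟨j, hij, hjl, hje⟩ := goodTails_start_end ts hg idx h hs
        obtain ⟨h1, h2⟩ := inner_eq ts (idx + 1) [ts[idx]!] acc
          ⟨j, by omega, hjl, hje⟩
        have hgeI := le_aInner ts (idx + 1)
        simp only [aOuterGo, if_pos h, if_neg (not_not_intro hs), if_pos h1]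
        rw [drop_cons_of_lt ts idx h, hs, bLoop_out_start]
        rw [hs] at h2
        rw [h2]
        rw [ih (aInner ts (idx + 1) + 1) _ (by omega)]
        have hstep : aInner ts (idx + 1) + 1 - idx = (aInner ts (idx + 1) + 1 - (idx + 1)) + 1 := by
          omega
        rw [hstep, List.take_succ_cons]
        simp
      · simp only [aOuterGo, if_pos h, if_pos hs]
        rw [drop_cons_of_lt ts idx h, bLoop_out_other _ _ _ _ hs]
        exact ih (idx + 1) acc (by omega)
    · rw [List.drop_eq_nil_of_le (by omega), bLoop_nil]
      simp [aOuterGo, h]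

-- ===== VERDICT (by name: the statement is the Claim_ definition above) =====
theorem split_staff_sequences_for_validation_py_spec : Claim_equal_split_staff_sequences_for_validation_py := by
  intro ts _ hpre
  unfold Spec_split_staff_sequences_for_validation_py
  unfold split_staff_sequences_for_validation_py split_staff_sequences_for_validation_py_alt
  by_cases h0 : ts = []
  · simp [h0]
  · rw [if_neg h0, if_neg h0]
    by_cases h1 : ts.count "<staff_start>" ≤ 1
    · rw [if_pos h1, if_pos h1]
    · rw [if_neg h1, if_neg h1]
      rcases hpre with h | h
      · exact absurd h h1
      · have := outer_eq ts h ts.length 0 [] (by omega)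
        simpa using this.symm
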